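-- pv_equiv track=rewrite | github.com/daveisagit/advent-of-code | src/2023/day_01.py | translate_line
-- ===== SOURCE A (Python) =====
-- digits_as_words = [
--     "one",
--     "two",
--     "three",
--     "four",
--     "five",
--     "six",
--     "seven",
--     "eight",
--     "nine",
-- ]
--
-- def translate_line(line: str, reverse=False) -> str:
--     """Translate the first (or last) digit word found to a digit.
--     Set the reverse argument to True to find the last.
--     """
--     if reverse:
--         line = line[::-1]
--     closest = len(line)
--     first_digit = None
--     for idx, word in enumerate(digits_as_words):
--         if reverse:
--             word = word[::-1]
--         try:
--             found_at = line.index(word)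
--             if found_at < closest:
--                 closest = found_at
--                 first_digit = idx
--         except ValueError:
--             pass
--
--     # first_digit is the index of digits_as_words
--     # we swap out the text for the digit character
--     if first_digit is not None:
--         look_for = digits_as_words[first_digit]
--         if reverse:
--             look_for = look_for[::-1]
--         line = line.replace(look_for, str(first_digit + 1), 1)
--
--     if reverse:
--         line = line[::-1]
--
--     return line
-- ===== SOURCE B (Python) =====
-- digits_as_words = [
--     "one",
--     "two",
--     "three",
--     "four",
--     "five",
--     "six",
--     "seven",
--     "eight",
--     "nine",
-- ]
--
-- def translate_line(line: str, reverse=False) -> str: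
--     """Translate the first (or last) digit word found to a digit.
--
--     Single left-to-right sweep: at each position try each word with
--     startswith; splice the digit in at the first hit.
--     """
--     if reverse:
--         line = line[::-1]
--         words = [w[::-1] for w in digits_as_words]
--     else:
--         words = list(digits_as_words)
--     for i in range(len(line)):
--         for idx, w in enumerate(words):
--             if line.startswith(w, i):
--                 out = line[:i] + str(idx + 1) + line[i + len(w):]
--                 return out[::-1] if reverse else out
--     return line[::-1] if reverse else line
-- ===== Notes on version B (the rewrite author's own statement) =====
-- stated objective: alternative
-- what changed: Replaced the nine per-word line.index scans with min-tracking and a replace() call by a single left-to-right position sweep that tests each word with startswith at each index and splices the digit in at the first hit.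
import Mathlib
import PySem

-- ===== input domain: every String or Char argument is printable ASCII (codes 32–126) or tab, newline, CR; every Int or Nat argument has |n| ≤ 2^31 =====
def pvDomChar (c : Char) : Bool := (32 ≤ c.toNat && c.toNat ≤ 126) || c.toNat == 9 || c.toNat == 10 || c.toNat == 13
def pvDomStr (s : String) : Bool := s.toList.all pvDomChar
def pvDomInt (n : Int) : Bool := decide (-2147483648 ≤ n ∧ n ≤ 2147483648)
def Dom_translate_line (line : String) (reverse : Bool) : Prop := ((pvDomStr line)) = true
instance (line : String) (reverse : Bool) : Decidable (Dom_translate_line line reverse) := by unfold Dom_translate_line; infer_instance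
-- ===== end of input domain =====

-- B replaces A's nine per-word index scans + min tracking by one left-to-right position
-- sweep (startswith at each index, splice at the first hit); objective: alternative.

-- ===== PORT A =====

-- digits_as_words
def pvWords : List (List Char) :=
  [['o','n','e'], ['t','w','o'], ['t','h','r','e','e'], ['f','o','u','r'],
   ['f','i','v','e'], ['s','i','x'], ['s','e','v','e','n'], ['e','i','g','h','t'],
   ['n','i','n','e']]

-- hand port of line.replace(old, new, 1): splice `new` over the FIRST occurrence of `old`
-- (Chars.find = str.index/-1); exact Python semantics, including old = "" (insert at front).
def pvReplace1 (cs old new : List Char) : List Char :=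
  let f := PySem.Chars.find cs old
  if f = -1 then cs else cs.take f.toNat ++ new ++ cs.drop (f.toNat + old.length)

-- loop body of A: try line.index(word) (ValueError ↦ find = -1, except: pass),
-- update (closest, first_digit) when found_at < closest
def pvStepA (reverse : Bool) (cs1 : List Char) (st : Int × Option Int)
    (p : Int × List Char) : Int × Option Int :=
  let w := if reverse then p.2.reverse else p.2
  let f := PySem.Chars.find cs1 w
  if f = -1 then st
  else if f < st.1 then (f, some p.1) else st

def pvA (cs : List Char) (reverse : Bool) : List Char :=
  let cs1 := if reverse then cs.reverse else cs
  let st := (PySem.List.enumerate pvWords).foldl (pvStepA reverse cs1) ((cs1.length : Int), none)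
  let cs2 :=
    match st.2 with
    | none => cs1
    | some k =>
        let lf := PySem.List.pyGetD pvWords k []
        let lf := if reverse then lf.reverse else lf
        pvReplace1 cs1 lf (PySem.Int.toChars (k + 1))
  if reverse then cs2.reverse else cs2

def translate_line (line : String) (reverse : Bool) : String :=
  String.ofList (pvA line.toList reverse)

-- ===== PORT B =====

-- inner `for idx, w in enumerate(words): if line.startswith(w, i)`
-- (startswith(w, i) ported as startswith on List.drop i — exact for 0 ≤ i)
def pvInnerB (cs1 : List Char) (i : Nat) : Nat → List (List Char) → Option (Nat × List Char)
  | _, [] => none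
  | idx, w :: t =>
      if PySem.Chars.startswith (cs1.drop i) w then some (idx, w)
      else pvInnerB cs1 i (idx + 1) t

-- outer `for i in range(len(line))`, rem = remaining positions
def pvScanB (ws : List (List Char)) (cs1 : List Char) : Nat → Nat → Option (Nat × Nat × List Char)
  | _, 0 => none
  | i, r + 1 =>
      match pvInnerB cs1 i 0 ws with
      | some (idx, w) => some (i, idx, w)
      | none => pvScanB ws cs1 (i + 1) r

def pvB (cs : List Char) (reverse : Bool) : List Char :=
  let cs1 := if reverse then cs.reverse else cs
  let ws := if reverse then pvWords.map List.reverse else pvWords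
  match pvScanB ws cs1 0 cs1.length with
  | some (i, idx, w) =>
      let out := cs1.take i ++ PySem.Int.toChars ((idx : Int) + 1) ++ cs1.drop (i + w.length)
      if reverse then out.reverse else out
  | none => if reverse then cs1.reverse else cs1

def translate_line_alt (line : String) (reverse : Bool) : String :=
  String.ofList (pvB line.toList reverse)

-- ===== PRECONDITION & SPEC =====
def Spec_translate_line (line : String) (reverse : Bool) (out : String) : Prop := out = translate_line_alt line reverse
instance (line : String) (reverse : Bool) (out : String) : Decidable (Spec_translate_line line reverse out) := by unfold Spec_translate_line; infer_instance

-- ===== CLAIM (what is proved, stated in full; the proofs are below) =====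
def Claim_equal_translate_line : Prop := ∀ (line : String) (reverse : Bool), Dom_translate_line line reverse → Spec_translate_line line reverse (translate_line line reverse)

-- ===== LEMMAS AND PROOFS =====

-- notation-free helper: find of w in cs1
-- B inner loop: none ↔ no word matches at position i
theorem pvInnerB_none (cs1 : List Char) (i : Nat) (idx0 : Nat) (ws : List (List Char)) :
    pvInnerB cs1 i idx0 ws = none ↔ ∀ w ∈ ws, ¬ w <+: cs1.drop i := by
  induction ws generalizing idx0 with
  | nil => simp [pvInnerB]
  | cons w t ih =>
      by_cases h : PySem.Chars.startswith (cs1.drop i) w = true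
      · simp only [pvInnerB, h, if_pos]
        constructor
        · intro hc; exact absurd hc (by simp)
        · intro hall; exact absurd ((PySem.Chars.startswith_iff _ _).mp h) (hall w (by simp))
      · have h' : ¬ w <+: cs1.drop i := fun hp => h ((PySem.Chars.startswith_iff _ _).mpr hp)
        simp [pvInnerB, h, ih, h']

-- B inner loop: some (idx, w) ⇒ idx is the first index whose word matches at i
theorem pvInnerB_some (cs1 : List Char) (i : Nat) (idx0 idx : Nat) (w : List Char)
    (ws : List (List Char)) (h : pvInnerB cs1 i idx0 ws = some (idx, w)) :
    ∃ j, idx = idx0 + j ∧ ws[j]? = some w ∧ w <+: cs1.drop i ∧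
      ∀ j' < j, ∀ v, ws[j']? = some v → ¬ v <+: cs1.drop i := by
  induction ws generalizing idx0 with
  | nil => simp [pvInnerB] at h
  | cons w0 t ih =>
      by_cases hs : PySem.Chars.startswith (cs1.drop i) w0 = true
      · simp [pvInnerB, hs] at h
        refine ⟨0, by omega, ?_, ?_, ?_⟩
        · simp [h.2]
        · exact h.2 ▸ (PySem.Chars.startswith_iff _ _).mp hs
        · intro j' hj'; omega
      · simp only [pvInnerB, hs] at h
        obtain ⟨j, hj, hget, hpre, hmin⟩ := ih (idx0 + 1) (by simpa using h)
        refine ⟨j + 1, by omega, by simpa using hget, hpre, ?_⟩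
        intro j' hj' v hv
        cases j' with
        | zero =>
            simp at hv
            exact hv ▸ fun hp => hs ((PySem.Chars.startswith_iff _ _).mpr hp)
        | succ j'' =>
            exact hmin j'' (by omega) v (by simpa using hv)

-- B outer loop: none ⇒ no word matches at any scanned position
theorem pvScanB_none (ws : List (List Char)) (cs1 : List Char) (i0 r : Nat)
    (h : pvScanB ws cs1 i0 r = none) :
    ∀ i, i0 ≤ i → i < i0 + r → ∀ w ∈ ws, ¬ w <+: cs1.drop i := by
  induction r generalizing i0 with
  | zero => intro i h1 h2; omega
  | succ r ih =>
      intro i h1 h2 w hw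
      cases hin : pvInnerB cs1 i0 0 ws with
      | some p => simp [pvScanB, hin] at h
      | none =>
          rcases Nat.eq_or_lt_of_le h1 with heq | hlt
          · exact heq ▸ (pvInnerB_none cs1 i0 0 ws).mp hin w hw
          · simp only [pvScanB, hin] at h
            exact ih (i0 + 1) h i hlt (by omega) w hw

-- B outer loop: some (i, idx, w) ⇒ i is the first position with any match,
-- and the inner loop produced (idx, w) there
theorem pvScanB_some (ws : List (List Char)) (cs1 : List Char) (i0 r i idx : Nat)
    (w : List Char) (h : pvScanB ws cs1 i0 r = some (i, idx, w)) :
    i0 ≤ i ∧ i < i0 + r ∧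
      (∀ j, i0 ≤ j → j < i → ∀ v ∈ ws, ¬ v <+: cs1.drop j) ∧
      pvInnerB cs1 i 0 ws = some (idx, w) := by
  induction r generalizing i0 with
  | zero => simp [pvScanB] at h
  | succ r ih =>
      cases hin : pvInnerB cs1 i0 0 ws with
      | some p =>
          obtain ⟨idx0, w0⟩ := p
          simp only [pvScanB, hin, Option.some.injEq, Prod.mk.injEq] at h
          obtain ⟨h1, h2, h3⟩ := h
          subst h1; subst h2; subst h3
          refine ⟨le_refl _, by omega, ?_, hin⟩
          intro j hj1 hj2; omega
      | none =>
          simp only [pvScanB, hin] at h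
          obtain ⟨h1, h2, h3, h4⟩ := ih (i0 + 1) h
          refine ⟨by omega, by omega, ?_, h4⟩
          intro j hj1 hj2 v hv
          rcases Nat.eq_or_lt_of_le hj1 with heq | hlt
          · exact heq ▸ (pvInnerB_none cs1 i0 0 ws).mp hin v hv
          · exact h3 j hlt hj2 v hv

-- find cs1 w = i when w matches at i and nowhere before
theorem pvFind_eq (cs1 w : List Char) (i : Nat) (hpre : w <+: cs1.drop i)
    (hmin : ∀ j < i, ¬ w <+: cs1.drop j) : PySem.Chars.find cs1 w = (i : Int) := by
  have hin : PySem.Chars.isIn w cs1 = true :=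
    (PySem.Chars.exists_prefix_drop_iff_isIn w cs1).mp ⟨i, hpre⟩
  have hnn : 0 ≤ PySem.Chars.find cs1 w := by
    rw [PySem.Chars.find_nonneg_iff]
    exact (PySem.Chars.isIn_iff_infix w cs1).mp hin
  obtain ⟨hp, hm⟩ := PySem.Chars.find_spec hnn
  have : (PySem.Chars.find cs1 w).toNat = i := by
    rcases Nat.lt_trichotomy (PySem.Chars.find cs1 w).toNat i with h | h | h
    · exact absurd hp (hmin _ h)
    · exact h
    · exact absurd hpre (hm i h)
  omega

-- if find ≥ 0 then w matches at find.toNat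
theorem pvFind_match (cs1 w : List Char) (h : PySem.Chars.find cs1 w ≠ -1) :
    w <+: cs1.drop (PySem.Chars.find cs1 w).toNat := by
  have hnn : 0 ≤ PySem.Chars.find cs1 w := by
    have := PySem.Chars.neg_one_le_find cs1 w
    omega
  exact (PySem.Chars.find_spec hnn).1

-- A's fold is the identity when the word cannot beat the running minimum
theorem pvFoldA_keep (cs1 : List Char) (ws : List (List Char)) (s : Int)
    (st : Int × Option Int)
    (h : ∀ w ∈ ws, PySem.Chars.find cs1 w = -1 ∨ st.1 ≤ PySem.Chars.find cs1 w) :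
    (PySem.List.enumerate ws s).foldl (pvStepA false cs1) st = st := by
  induction ws generalizing s with
  | nil => rfl
  | cons w t ih =>
      have hstep : pvStepA false cs1 st (s, w) = st := by
        rcases h w (by simp) with hf | hf
        · simp [pvStepA, hf]
        · simp only [pvStepA, Bool.false_eq_true, if_false]
          split_ifs with h1 h2 <;> first | rfl | omega
      show (PySem.List.enumerate t (s+1)).foldl (pvStepA false cs1) (pvStepA false cs1 st (s, w)) = st
      rw [hstep]
      exact ih (s + 1) (fun v hv => h v (by simp [hv]))

-- A's fold never updates when no word occurs
theorem pvFoldA_none (cs1 : List Char) (ws : List (List Char)) (s : Int)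
    (st : Int × Option Int) (h : ∀ w ∈ ws, PySem.Chars.find cs1 w = -1) :
    (PySem.List.enumerate ws s).foldl (pvStepA false cs1) st = st :=
  pvFoldA_keep cs1 ws s st (fun w hw => Or.inl (h w hw))

-- A's fold computes (i, some (s + j)) when word j is the first with the minimal
-- occurrence position i, every earlier word occurs strictly later (or never),
-- and the initial running minimum exceeds i
theorem pvFoldA_some (cs1 : List Char) (ws : List (List Char)) (s : Int)
    (st : Int × Option Int) (j i : Nat) (w : List Char)
    (hget : ws[j]? = some w)
    (hfw : PySem.Chars.find cs1 w = (i : Nat))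
    (hbefore : ∀ j' < j, ∀ v, ws[j']? = some v →
        PySem.Chars.find cs1 v = -1 ∨ (i : Int) < PySem.Chars.find cs1 v)
    (hall : ∀ (j' : Nat) (v : List Char), ws[j']? = some v →
        PySem.Chars.find cs1 v = -1 ∨ (i : Int) ≤ PySem.Chars.find cs1 v)
    (hst : (i : Int) < st.1) :
    (PySem.List.enumerate ws s).foldl (pvStepA false cs1) st = ((i : Int), some (s + j)) := by
  induction ws generalizing s st j with
  | nil => simp at hget
  | cons w0 t ih =>
      cases j with
      | zero =>
          have hw0 : w0 = w := by simpa using hget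
          have hstep : pvStepA false cs1 st (s, w0) = ((i : Int), some s) := by
            have hne : ¬((i : Int) = -1) := by omega
            simp only [pvStepA, Bool.false_eq_true, if_false, hw0, hfw]
            simp [hne, hst]
          show (PySem.List.enumerate t (s+1)).foldl (pvStepA false cs1) (pvStepA false cs1 st (s, w0)) = _
          rw [hstep, pvFoldA_keep cs1 t (s+1) _ ?_]
          · simp
          · intro v hv
            obtain ⟨j2, hj2⟩ := List.mem_iff_getElem?.mp hv
            exact hall (j2 + 1) v (by simpa using hj2)
      | succ j' =>
          have hstep : ∃ st', pvStepA false cs1 st (s, w0) = st' ∧ (i : Int) < st'.1 := by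
            rcases hbefore 0 (by omega) w0 (by simp) with hf | hf
            · exact ⟨st, by simp [pvStepA, hf], hst⟩
            · simp only [pvStepA, Bool.false_eq_true, if_false]
              split_ifs with h1 h2
              · exact ⟨st, rfl, hst⟩
              · exact ⟨_, rfl, hf⟩
              · exact ⟨st, rfl, hst⟩
          obtain ⟨st', hstep, hst'⟩ := hstep
          show (PySem.List.enumerate t (s+1)).foldl (pvStepA false cs1) (pvStepA false cs1 st (s, w0)) = _
          rw [hstep]
          have := ih (s + 1) st' j' (by simpa using hget)
            (fun j2 hj2 v hv => hbefore (j2 + 1) (by omega) v (by simpa using hv))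
            (fun j2 v hv => hall (j2 + 1) v (by simpa using hv)) hst'
          rw [this]
          have hcast : s + 1 + (j' : Int) = s + ((j' + 1 : Nat) : Int) := by push_cast; ring
          rw [hcast]

-- the word lists (plain and reversed) contain only nonempty words
theorem pvWords_ne_nil' :
    (∀ w ∈ pvWords.map List.reverse, w ≠ []) ∧ (∀ w ∈ pvWords, w ≠ []) := by decide

-- reversing words inside the loop body (A with reverse=True) is folding over the
-- reversed word list
theorem pvStepA_rev (cs1 : List Char) (st : Int × Option Int) (s : Int) (w : List Char) :
    pvStepA true cs1 st (s, w) = pvStepA false cs1 st (s, w.reverse) := by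
  simp [pvStepA]

theorem pvFoldA_rev (cs1 : List Char) (l : List (List Char)) (s : Int) (st : Int × Option Int) :
    (PySem.List.enumerate l s).foldl (pvStepA true cs1) st
      = (PySem.List.enumerate (l.map List.reverse) s).foldl (pvStepA false cs1) st := by
  induction l generalizing s st with
  | nil => rfl
  | cons w t ih =>
      show (PySem.List.enumerate t (s+1)).foldl (pvStepA true cs1) (pvStepA true cs1 st (s, w))
        = (PySem.List.enumerate (t.map List.reverse) (s+1)).foldl (pvStepA false cs1)
            (pvStepA false cs1 st (s, w.reverse))
      rw [pvStepA_rev]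
      exact ih (s + 1) _

-- joint characterization of B's scan and A's fold over the same word list
theorem pvCore (cs1 : List Char) (ws : List (List Char)) (hne : ∀ w ∈ ws, w ≠ []) :
    (pvScanB ws cs1 0 cs1.length = none ∧
      (PySem.List.enumerate ws).foldl (pvStepA false cs1) ((cs1.length : Int), none)
        = ((cs1.length : Int), none))
    ∨ ∃ i idx w, pvScanB ws cs1 0 cs1.length = some (i, idx, w) ∧
        ws[idx]? = some w ∧ PySem.Chars.find cs1 w = (i : Int) ∧ i < cs1.length ∧
        (PySem.List.enumerate ws).foldl (pvStepA false cs1) ((cs1.length : Int), none)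
          = ((i : Int), some ((idx : Nat) : Int)) := by
  cases hscan : pvScanB ws cs1 0 cs1.length with
  | none =>
      left
      refine ⟨rfl, pvFoldA_none cs1 ws 0 _ ?_⟩
      intro w hw
      by_contra hnef
      have hnn : 0 ≤ PySem.Chars.find cs1 w := by
        have := PySem.Chars.neg_one_le_find cs1 w; omega
      have hle := PySem.Chars.find_le_length cs1 w
      have hpre := pvFind_match cs1 w hnef
      have hnomatch := pvScanB_none ws cs1 0 cs1.length hscan
      have hlt : (PySem.Chars.find cs1 w).toNat < cs1.length := by
        rcases Nat.lt_or_ge (PySem.Chars.find cs1 w).toNat cs1.length with h | h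
        · exact h
        · exfalso
          have heq : (PySem.Chars.find cs1 w).toNat = cs1.length := by omega
          rw [heq, List.drop_length] at hpre
          exact hne w hw (List.prefix_nil.mp hpre)
      exact hnomatch _ (Nat.zero_le _) (by omega) w hw hpre
  | some t =>
      obtain ⟨i, idx, w⟩ := t
      right
      obtain ⟨-, hilen, hminpos, hinner⟩ := pvScanB_some ws cs1 0 cs1.length i idx w hscan
      obtain ⟨j, hj0, hget, hpre, hminidx⟩ := pvInnerB_some cs1 i 0 idx w ws hinner
      have hj : j = idx := by omega
      subst hj
      have hwmem : w ∈ ws := List.mem_iff_getElem?.mpr ⟨j, hget⟩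
      have hfw : PySem.Chars.find cs1 w = (i : Int) :=
        pvFind_eq cs1 w i hpre (fun j' hj' => hminpos j' (Nat.zero_le _) hj' w hwmem)
      have hall : ∀ (j' : Nat) (v : List Char), ws[j']? = some v →
          PySem.Chars.find cs1 v = -1 ∨ (i : Int) ≤ PySem.Chars.find cs1 v := by
        intro j' v hv
        by_cases hfv : PySem.Chars.find cs1 v = -1
        · exact Or.inl hfv
        · right
          have hnn : 0 ≤ PySem.Chars.find cs1 v := by
            have := PySem.Chars.neg_one_le_find cs1 v; omega
          have hprev := pvFind_match cs1 v hfv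
          by_cases h : ((i : Int)) ≤ PySem.Chars.find cs1 v
          · exact h
          · exfalso
            have hvm : v ∈ ws := List.mem_iff_getElem?.mpr ⟨j', hv⟩
            exact hminpos (PySem.Chars.find cs1 v).toNat (Nat.zero_le _) (by omega) v hvm hprev
      have hbefore : ∀ j' < j, ∀ (v : List Char), ws[j']? = some v →
          PySem.Chars.find cs1 v = -1 ∨ (i : Int) < PySem.Chars.find cs1 v := by
        intro j' hj' v hv
        rcases hall j' v hv with hf | hf
        · exact Or.inl hf
        · right
          have hfne : PySem.Chars.find cs1 v ≠ (i : Int) := by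
            intro heq
            have hprev := pvFind_match cs1 v (by omega)
            rw [heq] at hprev
            simp only [Int.toNat_natCast] at hprev
            exact hminidx j' hj' v hv hprev
          omega
      refine ⟨i, j, w, rfl, hget, hfw, by omega, ?_⟩
      have := pvFoldA_some cs1 ws 0 ((cs1.length : Int), none) j i w hget hfw hbefore hall
        (by show (i : Int) < (cs1.length : Int); omega)
      rw [this, zero_add]

-- core equivalence on char lists
theorem pvAB (cs : List Char) (reverse : Bool) : pvA cs reverse = pvB cs reverse := by
  cases reverse
  · rcases pvCore cs pvWords pvWords_ne_nil'.2
        with ⟨hscan, hfold⟩ | ⟨i, idx, w, hscan, hget, hfw, hilen, hfold⟩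
    · simp [pvA, pvB, hscan, hfold]
    · have hidx : idx < pvWords.length := (List.getElem?_eq_some_iff.mp hget).choose
      have hw : pvWords[idx] = w := (List.getElem?_eq_some_iff.mp hget).choose_spec
      simp only [pvA, pvB, Bool.false_eq_true, if_false, hscan, hfold]
      rw [PySem.List.pyGetD_eq_getElem pvWords [] (by omega) (by exact_mod_cast hidx)]
      simp only [Int.toNat_natCast]
      rw [hw]
      simp [pvReplace1, hfw]
  · rcases pvCore cs.reverse (pvWords.map List.reverse) pvWords_ne_nil'.1
        with ⟨hscan, hfold⟩ | ⟨i, idx, w, hscan, hget, hfw, hilen, hfold⟩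
    · simp only [List.length_reverse] at hscan hfold
      simp [pvA, pvB, pvFoldA_rev, hscan, hfold]
    · have hidx : idx < pvWords.length := by
        have h' : idx < (pvWords.map List.reverse).length :=
          (List.getElem?_eq_some_iff.mp hget).choose
        simpa using h'
      have hw : (pvWords[idx]).reverse = w := by
        have h' := (List.getElem?_eq_some_iff.mp hget).choose_spec
        simpa using h'
      simp only [List.length_reverse] at hscan hfold
      simp only [pvA, pvB, pvFoldA_rev, List.length_reverse, if_true, hscan, hfold]
      rw [PySem.List.pyGetD_eq_getElem pvWords [] (by omega) (by exact_mod_cast hidx)]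
      simp only [Int.toNat_natCast]
      rw [hw]
      simp [pvReplace1, hfw]

theorem translate_line_spec : Claim_equal_translate_line := by
  intro line reverse _
  unfold Spec_translate_line translate_line translate_line_alt
  rw [pvAB]
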